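-- pv_equiv track=rewrite | github.com/arquejadalucy/challenges | lexicografic_palindrome_password.py | findEncryptedPassword
-- ===== SOURCE A (Python) =====
-- def findEncryptedPassword(password):
--     char_counts = sorted((char, password.count(char)) for char in set(password))
--     palindrome = ''
--     middle_char = ''
--     for char, count in char_counts:
--         if count % 2 == 1:
--             if middle_char == '':
--                 middle_char = char
--             else:
--                 return "No palindrome possible"
--         palindrome += char * (count // 2)
--     return palindrome + middle_char + palindrome[::-1]
-- ===== SOURCE B (Python) =====
-- def findEncryptedPassword(password):
--     # parity toggle: after the loop, odd holds exactly the characters with odd count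
--     odd = set()
--     for c in password:
--         if c in odd:
--             odd.discard(c)
--         else:
--             odd.add(c)
--     if len(odd) > 1:
--         return "No palindrome possible"
--     middle = min(odd) if odd else ''
--     rest = sorted(password)
--     if middle:
--         rest.remove(middle)
--     # every run in rest now has even length, so rest[::2] is half of each run
--     half = ''.join(rest[::2])
--     return half + middle + half[::-1]
-- ===== Notes on version B (the rewrite author's own statement) =====
-- stated objective: alternative
-- what changed: B never counts characters: a single parity-toggle pass over the password yields the set of odd-count characters (error if more than one), and the half is extracted as the stride slice rest[::2] of the sorted characters after removing one occurrence of the middle, instead of A's set-dedup + per-character .count scans + sorted pair loop.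
import Mathlib
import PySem

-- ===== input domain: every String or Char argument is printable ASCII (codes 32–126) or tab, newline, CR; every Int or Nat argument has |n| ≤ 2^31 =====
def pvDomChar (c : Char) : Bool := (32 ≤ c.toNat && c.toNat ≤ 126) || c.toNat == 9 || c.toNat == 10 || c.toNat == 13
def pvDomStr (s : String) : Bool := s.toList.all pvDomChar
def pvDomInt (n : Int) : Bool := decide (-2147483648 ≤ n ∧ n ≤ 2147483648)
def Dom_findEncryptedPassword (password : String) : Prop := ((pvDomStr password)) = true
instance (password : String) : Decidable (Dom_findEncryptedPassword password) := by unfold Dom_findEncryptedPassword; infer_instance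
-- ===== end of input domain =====

-- B never counts characters: a parity-toggle pass collects the odd-count characters, and the
-- half-palindrome is the stride slice rest[::2] of the sorted characters (after removing one
-- middle occurrence); same return value as A on every input (proved below).

-- ===== PORT A =====
-- the loop 'for char, count in char_counts' with early return; accumulators kept as List Char
-- (Python str concatenation / reversal are exact on code-point lists)
def pvALoop : List (Char × Int) → List Char → List Char → String
  | [], pal, mid => String.mk (pal ++ mid ++ pal.reverse)   -- palindrome + middle_char + palindrome[::-1]
  | (c, cnt) :: rest, pal, mid =>
    if PySem.Int.mod cnt 2 == 1 then
      if mid.isEmpty then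
        pvALoop rest (pal ++ PySem.List.pyRepeat [c] (PySem.Int.floordiv cnt 2)) [c]
      else "No palindrome possible"
    else pvALoop rest (pal ++ PySem.List.pyRepeat [c] (PySem.Int.floordiv cnt 2)) mid

def findEncryptedPassword (password : String) : String :=
  -- sorted((char, password.count(char)) for char in set(password)) : tuples sorted lexicographically
  let charCounts := PySem.List.sorted2
    ((PySem.Set.ofList password.toList).map
      (fun c => (c, (PySem.Str.count password (String.mk [c]) : Int))))
    Prod.fst Prod.snd
  pvALoop charCounts [] []

-- ===== PORT B =====
-- 'if c in odd: odd.discard(c) else: odd.add(c)' — one toggle step of the parity set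
def pvToggle (odd : PySem.Set Char) (c : Char) : PySem.Set Char :=
  if PySem.Set.contains odd c then PySem.Set.discard odd c else PySem.Set.add odd c

def findEncryptedPassword_alt (password : String) : String :=
  let odd := password.toList.foldl pvToggle PySem.Set.empty   -- for c in password: toggle
  if 1 < PySem.Set.len odd then "No palindrome possible"
  else
    -- middle = min(odd) if odd else ''  (min over a set: order-independent)
    let middle : List Char :=
      match PySem.List.min? odd (fun x => x) with
      | some m => [m]
      | none => []
    let rest0 := PySem.List.sorted password.toList (fun c => c)
    -- if middle: rest.remove(middle)  — never a ValueError: middle has odd count so it occurs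
    let rest := match middle with
      | [] => rest0
      | m :: _ => (PySem.List.remove? rest0 m).getD rest0
    -- half = ''.join(rest[::2])  (step 2 ≠ 0, so slice? is always some)
    let half := (PySem.List.slice? rest none none 2).getD []
    String.mk (half ++ middle ++ half.reverse)

-- ===== PRECONDITION & SPEC =====
def Spec_findEncryptedPassword (password : String) (out : String) : Prop := out = findEncryptedPassword_alt password
instance (password : String) (out : String) : Decidable (Spec_findEncryptedPassword password out) := by unfold Spec_findEncryptedPassword; infer_instance

-- ===== CLAIM (what is proved, stated in full; the proofs are below) =====
def Claim_equal_findEncryptedPassword : Prop := ∀ (password : String), Dom_findEncryptedPassword password → Spec_findEncryptedPassword password (findEncryptedPassword password)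

-- ===== LEMMAS AND PROOFS =====

-- run-length pairs of a character list: (first char of run, length of run), proof-only helper
def pvPairs : List Char → List (Char × Int)
  | [] => []
  | c :: rest =>
      (c, (((rest.takeWhile (· == c)).length + 1 : Nat) : Int)) :: pvPairs (rest.dropWhile (· == c))
  termination_by cs => cs.length
  decreasing_by
    simp only [List.length_cons]
    exact Nat.lt_succ_of_le (List.length_dropWhile_le _ _)

-- per-run halves: count/2 copies of each run char, in order (proof-only)
def pvHalves : List Char → List Char
  | [] => []
  | c :: rest =>
      List.replicate (((rest.takeWhile (· == c)).length + 1) / 2) c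
        ++ pvHalves (rest.dropWhile (· == c))
  termination_by cs => cs.length
  decreasing_by
    simp only [List.length_cons]
    exact Nat.lt_succ_of_le (List.length_dropWhile_le _ _)

-- run chars with odd run length, in order (proof-only)
def pvOdds : List Char → List Char
  | [] => []
  | c :: rest =>
      (if ((rest.takeWhile (· == c)).length + 1) % 2 = 1 then [c] else [])
        ++ pvOdds (rest.dropWhile (· == c))
  termination_by cs => cs.length
  decreasing_by
    simp only [List.length_cons]
    exact Nat.lt_succ_of_le (List.length_dropWhile_le _ _)

-- every other element, starting at index 0 (what rest[::2] selects; proof-only)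
def pvEvens : List Char → List Char
  | [] => []
  | [a] => [a]
  | a :: _ :: t => a :: pvEvens t

def pvOut (h m : List Char) : String := String.mk (h ++ m ++ h.reverse)

-- in a sorted list, everything after the leading run is strictly greater than the head
theorem pvDropWhile_gt (c : Char) (rest : List Char)
    (hs : List.Pairwise (· ≤ ·) (c :: rest)) :
    ∀ x ∈ rest.dropWhile (· == c), c < x := by
  have hle : ∀ x ∈ rest, c ≤ x := (List.pairwise_cons.mp hs).1
  have hpw : List.Pairwise (· ≤ ·) (rest.dropWhile (· == c)) :=
    ((List.pairwise_cons.mp hs).2).sublist (List.dropWhile_sublist _)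
  cases hdw : rest.dropWhile (· == c) with
  | nil => simp
  | cons d dt =>
    have hdne : (d == c) = false := by
      have := List.head?_dropWhile_not (· == c) rest
      rw [hdw] at this
      exact this
    have hdmem : d ∈ rest.dropWhile (· == c) := by rw [hdw]; simp
    have hdrest : d ∈ rest := List.Sublist.mem hdmem (List.dropWhile_sublist _)
    have hcd : c < d :=
      lt_of_le_of_ne (hle d hdrest) (Ne.symm (fun h => by simp [h] at hdne))
    intro x hx
    rcases List.mem_cons.mp hx with rfl | hx'
    · exact hcd
    · rw [hdw] at hpw
      exact lt_of_lt_of_le hcd ((List.pairwise_cons.mp hpw).1 x hx')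

-- the first components of the run pairs are exactly the characters of the list
theorem pvPairs_fst_mem (s : List Char) (x : Char) :
    x ∈ (pvPairs s).map Prod.fst ↔ x ∈ s := by
  induction s using pvPairs.induct with
  | case1 => simp [pvPairs]
  | case2 c rest ih =>
    simp only [pvPairs, List.map_cons, List.mem_cons, ih]
    constructor
    · rintro (rfl | h)
      · exact Or.inl rfl
      · exact Or.inr (List.Sublist.mem h (List.dropWhile_sublist _))
    · rintro (rfl | h')
      · exact Or.inl rfl
      · rw [← List.takeWhile_append_dropWhile (p := (· == c)) (l := rest)] at h'
        rcases List.mem_append.mp h' with h'' | h''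
        · exact Or.inl (by simpa using List.mem_takeWhile_imp h'')
        · exact Or.inr h''

-- on a sorted list the run pairs have strictly increasing first components
theorem pvPairs_pairwise (s : List Char) (hs : List.Pairwise (· ≤ ·) s) :
    List.Pairwise (fun a b => a.1 < b.1) (pvPairs s) := by
  induction s using pvPairs.induct with
  | case1 => simp [pvPairs]
  | case2 c rest ih =>
    have hpw : List.Pairwise (· ≤ ·) (rest.dropWhile (· == c)) :=
      ((List.pairwise_cons.mp hs).2).sublist (List.dropWhile_sublist _)
    rw [pvPairs]
    refine List.pairwise_cons.mpr ⟨?_, ih hpw⟩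
    intro p hp
    have : p.1 ∈ rest.dropWhile (· == c) :=
      (pvPairs_fst_mem _ _).mp (List.mem_map_of_mem hp)
    exact pvDropWhile_gt c rest hs _ this

-- each run pair carries the count of its character in the whole (sorted) list
theorem pvPairs_eq_map (s : List Char) (hs : List.Pairwise (· ≤ ·) s) :
    pvPairs s = ((pvPairs s).map Prod.fst).map (fun x => (x, (s.count x : Int))) := by
  induction s using pvPairs.induct with
  | case1 => simp [pvPairs]
  | case2 c rest ih =>
    have hpw : List.Pairwise (· ≤ ·) (rest.dropWhile (· == c)) :=
      ((List.pairwise_cons.mp hs).2).sublist (List.dropWhile_sublist _)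
    have htw : ∀ x ∈ rest.takeWhile (· == c), x = c := by
      intro x hx; simpa using List.mem_takeWhile_imp hx
    have hgt := pvDropWhile_gt c rest hs
    have hccount : (c :: rest).count c = (rest.takeWhile (· == c)).length + 1 := by
      rw [List.count_cons_self]
      congr 1
      conv_lhs => rw [← List.takeWhile_append_dropWhile (p := (· == c)) (l := rest)]
      rw [List.count_append]
      have h1 : (rest.takeWhile (· == c)).count c = (rest.takeWhile (· == c)).length :=
        List.count_eq_length.mpr (fun x hx => by simp [htw x hx])
      have h2 : (rest.dropWhile (· == c)).count c = 0 :=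
        List.count_eq_zero.mpr (fun h => lt_irrefl c (hgt c h))
      omega
    rw [pvPairs]
    simp only [List.map_cons]
    congr 1
    · simp [hccount]
    · conv_lhs => rw [ih hpw]
      apply List.map_congr_left
      intro x hx
      have hxdw : x ∈ rest.dropWhile (· == c) := (pvPairs_fst_mem _ _).mp hx
      have hcx : c < x := hgt x hxdw
      have hxc : (c == x) = false := beq_eq_false_iff_ne.mpr (ne_of_lt hcx)
      have h1 : List.count x (rest.takeWhile (· == c)) = 0 := by
        rw [List.count_eq_zero]
        intro h
        have := htw x h
        subst this
        exact lt_irrefl _ hcx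
      congr 1
      conv_rhs => rw [← List.takeWhile_append_dropWhile (p := (· == c)) (l := rest)]
      rw [List.count_cons, List.count_append, h1, hxc]
      simp

-- Python str.count with a single-character needle is the character count
theorem pvCountGo_singleton (c : Char) (l : List Char) (fuel acc : Nat)
    (hf : l.length ≤ fuel) :
    PySem.Chars.count.go [c] fuel l acc = acc + l.count c := by
  induction l generalizing fuel acc with
  | nil => cases fuel <;> simp [PySem.Chars.count.go]
  | cons h t iht =>
    cases fuel with
    | zero => simp at hf
    | succ fuel =>
      rw [PySem.Chars.count.go]
      have hpre : [c].isPrefixOf (h :: t) = (c == h) := by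
        simp [List.isPrefixOf]
      by_cases hch : c = h
      · subst hch
        simp only [hpre, BEq.rfl, if_true]
        change PySem.Chars.count.go [c] fuel t (acc + 1) = acc + List.count c (c :: t)
        rw [iht fuel (acc + 1) (by simpa using hf)]
        simp
        omega
      · have hf' : (c == h) = false := by simpa using hch
        simp only [hpre, hf', Bool.false_eq_true, if_false]
        rw [iht fuel acc (by simpa using hf)]
        have hhc : (h == c) = false := by simpa using Ne.symm hch
        simp [List.count_cons, hhc]

theorem pvCount_singleton (s : List Char) (c : Char) :
    PySem.Chars.count s [c] = s.count c := by
  rw [PySem.Chars.count]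
  simp only [List.isEmpty_cons]
  simpa using pvCountGo_singleton c s s.length 0 le_rfl

-- sorting by a two-component key is sorting by the lexicographic key
theorem pvSorted2_eq_sorted_lex {α : Type} (xs : List α) (k1 : α → Char) (k2 : α → Int) :
    PySem.List.sorted2 xs k1 k2 = PySem.List.sorted xs (fun a => toLex (k1 a, k2 a)) := by
  rw [PySem.List.sorted2, PySem.List.sorted]
  simp only [if_neg (by simp : ¬ (false = true))]
  have hlt : (fun a b => decide (k1 a < k1 b) || (!decide (k1 b < k1 a) && decide (k2 a < k2 b)))
      = (fun a b => decide (toLex (k1 a, k2 a) < toLex (k1 b, k2 b))) := by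
    funext a b
    rcases lt_trichotomy (k1 a) (k1 b) with h | h | h
    · simp [Prod.Lex.lt_iff, h]
    · simp [Prod.Lex.lt_iff, h]
    · simp [Prod.Lex.lt_iff, h, not_lt_of_gt h]
      intro heq
      rw [heq] at h
      exact absurd h (lt_irrefl _)
  rw [hlt]

-- A's sorted distinct (char, count) list IS the run-pair list of the sorted characters
theorem pvCharCounts_eq (l : List Char) :
    PySem.List.sorted2
      ((PySem.Set.ofList l).map (fun c => (c, (l.count c : Int))))
      Prod.fst Prod.snd
    = pvPairs (PySem.List.sorted l (fun c => c)) := by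
  set s := PySem.List.sorted l (fun c => c) with hsdef
  have hsperm : s.Perm l := PySem.List.sorted_perm l (fun c => c) false
  have hspw : List.Pairwise (· ≤ ·) s := PySem.List.sorted_pairwise l (fun c => c)
  rw [pvSorted2_eq_sorted_lex]
  apply PySem.List.sorted_eq_of_perm_of_pairwise_lt
  · rw [pvPairs_eq_map s hspw]
    have hperm : ((pvPairs s).map Prod.fst).Perm (PySem.Set.ofList l) := by
      apply List.perm_of_nodup_nodup_toFinset_eq
      · have := pvPairs_pairwise s hspw
        have : List.Pairwise (· < ·) ((pvPairs s).map Prod.fst) :=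
          (List.pairwise_map).mpr this
        exact this.nodup
      · exact PySem.Set.nodup_ofList l
      · ext x
        simp [pvPairs_fst_mem, PySem.Set.mem_ofList, hsperm.mem_iff]
    have hcnt : ∀ x : Char, s.count x = l.count x := fun x => hsperm.count_eq x
    have h1 : (((pvPairs s).map Prod.fst).map fun x => (x, (s.count x : Int)))
        = (((pvPairs s).map Prod.fst).map fun x => (x, (l.count x : Int))) := by
      apply List.map_congr_left
      intro x _
      rw [hcnt]
    rw [h1]
    exact hperm.map _
  · exact (pvPairs_pairwise s hspw).imp (fun h => Prod.Lex.lt_iff.mpr (Or.inl h))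

-- A's loop, characterised: error iff a second odd run shows up, else halves + middle + reverse
theorem pvALoop_char (s : List Char) (pal mid : List Char) :
    pvALoop (pvPairs s) pal mid =
      if mid.isEmpty then
        match pvOdds s with
        | [] => pvOut (pal ++ pvHalves s) []
        | [m] => pvOut (pal ++ pvHalves s) [m]
        | _ => "No palindrome possible"
      else if pvOdds s = [] then pvOut (pal ++ pvHalves s) mid
      else "No palindrome possible" := by
  induction s using pvPairs.induct generalizing pal mid with
  | case1 =>
    cases mid <;> simp [pvPairs, pvALoop, pvOdds, pvHalves, pvOut]
  | case2 c rest ih =>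
    have hm : PySem.Int.mod (((rest.takeWhile (· == c)).length + 1 : Nat) : Int) 2 =
        ((((rest.takeWhile (· == c)).length + 1) % 2 : Nat) : Int) := by
      simp [PySem.Int.mod, Int.fmod_eq_emod]
    have hmod : (PySem.Int.mod (((rest.takeWhile (· == c)).length + 1 : Nat) : Int) 2 == 1) =
        (((rest.takeWhile (· == c)).length + 1) % 2 == 1) := by
      rw [hm]
      rcases Nat.mod_two_eq_zero_or_one ((rest.takeWhile (· == c)).length + 1) with h | h <;>
        simp [h]
    have hd : PySem.Int.floordiv (((rest.takeWhile (· == c)).length + 1 : Nat) : Int) 2 =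
        ((((rest.takeWhile (· == c)).length + 1) / 2 : Nat) : Int) := by
      simp [PySem.Int.floordiv, Int.fdiv_eq_ediv]
    have hrep : PySem.List.pyRepeat [c]
        (PySem.Int.floordiv (((rest.takeWhile (· == c)).length + 1 : Nat) : Int) 2) =
        List.replicate (((rest.takeWhile (· == c)).length + 1) / 2) c := by
      rw [PySem.List.pyRepeat_singleton, hd]
      congr 1
    rw [pvPairs, pvALoop]
    simp only [hmod, hrep]
    rcases Nat.mod_two_eq_zero_or_one ((rest.takeWhile (· == c)).length + 1) with hpar | hpar
    · -- even run: nothing changes except the accumulator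
      have hb : (((rest.takeWhile (· == c)).length + 1) % 2 == 1) = false := by simp [hpar]
      rw [hb]
      simp only [Bool.false_eq_true, if_false]
      rw [ih]
      have ho : pvOdds (c :: rest) = pvOdds (rest.dropWhile (· == c)) := by
        rw [pvOdds]; simp [hpar]
      have hh : pvHalves (c :: rest) =
          List.replicate (((rest.takeWhile (· == c)).length + 1) / 2) c
            ++ pvHalves (rest.dropWhile (· == c)) := by rw [pvHalves]
      rw [ho, hh]
      simp [List.append_assoc]
    · -- odd run
      have hb : (((rest.takeWhile (· == c)).length + 1) % 2 == 1) = true := by simp [hpar]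
      rw [hb]
      simp only [if_true]
      have ho : pvOdds (c :: rest) = c :: pvOdds (rest.dropWhile (· == c)) := by
        rw [pvOdds]; simp [hpar]
      have hh : pvHalves (c :: rest) =
          List.replicate (((rest.takeWhile (· == c)).length + 1) / 2) c
            ++ pvHalves (rest.dropWhile (· == c)) := by rw [pvHalves]
      cases mid with
      | nil =>
        simp only [List.isEmpty_nil, if_true]
        rw [ih]
        simp only [List.isEmpty_cons, Bool.false_eq_true, if_false]
        rw [ho, hh]
        rcases hodw : pvOdds (rest.dropWhile (· == c)) with _ | ⟨m2, tl⟩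
        · simp [List.append_assoc]
        · simp
      | cons m0 mt =>
        simp only [List.isEmpty_cons, Bool.false_eq_true, if_false]
        rw [ho]
        simp

-- membership after one toggle step
theorem pvToggle_mem (acc : PySem.Set Char) (c x : Char) :
    x ∈ pvToggle acc c ↔ (if x = c then c ∉ acc else x ∈ acc) := by
  unfold pvToggle
  by_cases hc : c ∈ acc
  · rw [if_pos (by simpa [PySem.Set.contains_iff] using hc)]
    by_cases hx : x = c
    · subst hx; simp [PySem.Set.mem_discard, hc]
    · simp [PySem.Set.mem_discard, hx]
  · rw [if_neg (by simpa [PySem.Set.contains_iff] using hc)]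
    by_cases hx : x = c
    · subst hx; simp [hc]
    · simp [PySem.Set.mem_add, hx]

theorem pvToggle_nodup (acc : PySem.Set Char) (c : Char) (h : acc.Nodup) :
    (pvToggle acc c).Nodup := by
  unfold pvToggle
  by_cases hc : PySem.Set.contains acc c = true
  · rw [if_pos hc]
    exact List.Nodup.filter _ h
  · rw [if_neg hc]
    rw [PySem.Set.add_of_not_mem (by simpa [PySem.Set.contains_iff] using hc)]
    rw [List.nodup_append]
    refine ⟨h, List.nodup_singleton c, ?_⟩
    intro a ha b hb
    rw [List.mem_singleton] at hb
    subst hb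
    intro hab
    subst hab
    exact hc (by simpa [PySem.Set.contains_iff] using ha)

-- the parity-toggle fold: membership = odd count in the processed list (relative to the start)
theorem pvToggleFold_mem (l : List Char) (acc : PySem.Set Char) (x : Char) :
    x ∈ l.foldl pvToggle acc ↔ ((x ∈ acc) ↔ l.count x % 2 = 0) := by
  induction l generalizing acc with
  | nil => simp
  | cons c t ih =>
    rw [List.foldl_cons, ih, pvToggle_mem]
    by_cases hx : x = c
    · subst hx
      rw [if_pos rfl, List.count_cons_self]
      have hpar : ((t.count x + 1) % 2 = 0) ↔ ¬ (t.count x % 2 = 0) := by omega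
      rw [hpar]
      tauto
    · rw [if_neg hx]
      have hcnt : List.count x (c :: t) = List.count x t := by
        simp [Ne.symm hx]
      rw [hcnt]

theorem pvToggleFold_nodup (l : List Char) (acc : PySem.Set Char) (h : acc.Nodup) :
    (l.foldl pvToggle acc).Nodup := by
  induction l generalizing acc with
  | nil => exact h
  | cons c t ih => exact ih _ (pvToggle_nodup _ _ h)

-- pvOdds: characters, membership = odd count (sorted input), strictly increasing
theorem pvOdds_subset (s : List Char) (x : Char) (h : x ∈ pvOdds s) : x ∈ s := by
  induction s using pvPairs.induct with
  | case1 => simp [pvOdds] at h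
  | case2 c rest ih =>
    rw [pvOdds] at h
    rcases List.mem_append.mp h with h1 | h1
    · split at h1
      · have hxc : x = c := by simpa using h1
        subst hxc
        exact List.mem_cons_self
      · simp at h1
    · exact List.mem_cons_of_mem _ (List.Sublist.mem (ih h1) (List.dropWhile_sublist _))

theorem pvOdds_pairwise (s : List Char) (hs : List.Pairwise (· ≤ ·) s) :
    List.Pairwise (· < ·) (pvOdds s) := by
  induction s using pvPairs.induct with
  | case1 => simp [pvOdds]
  | case2 c rest ih =>
    have hpw : List.Pairwise (· ≤ ·) (rest.dropWhile (· == c)) :=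
      ((List.pairwise_cons.mp hs).2).sublist (List.dropWhile_sublist _)
    rw [pvOdds]
    rcases Nat.mod_two_eq_zero_or_one ((rest.takeWhile (· == c)).length + 1) with hpar | hpar
    · simp only [hpar]
      simpa using ih hpw
    · simp only [hpar]
      refine List.pairwise_cons.mpr ⟨?_, ih hpw⟩
      intro x hx
      exact pvDropWhile_gt c rest hs x (pvOdds_subset _ x hx)

theorem pvOdds_mem_iff (s : List Char) (hs : List.Pairwise (· ≤ ·) s) (x : Char) :
    x ∈ pvOdds s ↔ s.count x % 2 = 1 := by
  induction s using pvPairs.induct with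
  | case1 => simp [pvOdds]
  | case2 c rest ih =>
    have hpw : List.Pairwise (· ≤ ·) (rest.dropWhile (· == c)) :=
      ((List.pairwise_cons.mp hs).2).sublist (List.dropWhile_sublist _)
    have htw : ∀ y ∈ rest.takeWhile (· == c), y = c := by
      intro y hy; simpa using List.mem_takeWhile_imp hy
    have hgt := pvDropWhile_gt c rest hs
    by_cases hx : x = c
    · subst hx
      have hccount : (x :: rest).count x = (rest.takeWhile (· == x)).length + 1 := by
        rw [List.count_cons_self]
        congr 1
        conv_lhs => rw [← List.takeWhile_append_dropWhile (p := (· == x)) (l := rest)]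
        rw [List.count_append]
        have h1 : (rest.takeWhile (· == x)).count x = (rest.takeWhile (· == x)).length :=
          List.count_eq_length.mpr (fun y hy => by simp [htw y hy])
        have h2 : (rest.dropWhile (· == x)).count x = 0 :=
          List.count_eq_zero.mpr (fun h => lt_irrefl x (hgt x h))
        omega
      have hnotdw : x ∉ pvOdds (rest.dropWhile (· == x)) := by
        intro h
        exact lt_irrefl x (hgt x (pvOdds_subset _ x h))
      rw [pvOdds, hccount]
      rcases Nat.mod_two_eq_zero_or_one ((rest.takeWhile (· == x)).length + 1) with hpar | hpar <;>
        simp [hpar, hnotdw]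
    · have hcount : (c :: rest).count x = (rest.dropWhile (· == c)).count x := by
        have hxc : (c == x) = false := by simpa using fun h => hx h.symm
        rw [List.count_cons, hxc]
        conv_lhs => rw [← List.takeWhile_append_dropWhile (p := (· == c)) (l := rest)]
        rw [List.count_append]
        have h1 : (rest.takeWhile (· == c)).count x = 0 := by
          rw [List.count_eq_zero]
          intro h
          exact hx (htw x h)
        simp [h1]
      rw [pvOdds, hcount, ← ih hpw]
      rcases Nat.mod_two_eq_zero_or_one ((rest.takeWhile (· == c)).length + 1) with hpar | hpar <;>
        simp [hpar, hx]

-- evens passes evenly through an even-length run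
theorem pvEvens_replicate (k : Nat) (c : Char) (r : List Char) :
    pvEvens (List.replicate (2 * k) c ++ r) = List.replicate k c ++ pvEvens r := by
  induction k with
  | zero => simp
  | succ k ih =>
    have h2 : 2 * (k + 1) = (2 * k) + 1 + 1 := by omega
    rw [h2, List.replicate_succ, List.replicate_succ, List.cons_append, List.cons_append,
      pvEvens, ih, List.replicate_succ, List.cons_append]

-- the leading run as a replicate
theorem pvRun_replicate (c : Char) (rest : List Char) :
    (c :: rest : List Char) =
      List.replicate ((rest.takeWhile (· == c)).length + 1) c ++ rest.dropWhile (· == c) := by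
  have htw : rest.takeWhile (· == c) = List.replicate (rest.takeWhile (· == c)).length c := by
    apply List.eq_replicate_of_mem
    intro y hy
    simpa using List.mem_takeWhile_imp hy
  conv_lhs => rw [← List.takeWhile_append_dropWhile (p := (· == c)) (l := rest)]
  rw [List.replicate_succ, List.cons_append]
  congr 1
  rw [← htw]

-- all runs even: evens of the sorted list is exactly the per-run halves
theorem pvEvens_of_no_odds (s : List Char) (h : pvOdds s = []) :
    pvEvens s = pvHalves s := by
  induction s using pvPairs.induct with
  | case1 => simp [pvEvens, pvHalves]
  | case2 c rest ih =>
    rw [pvOdds] at h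
    rcases Nat.mod_two_eq_zero_or_one ((rest.takeWhile (· == c)).length + 1) with hpar | hpar
    · rw [hpar, if_neg (by omega : ¬ (0 = 1)), List.nil_append] at h
      have hk : (rest.takeWhile (· == c)).length + 1 =
          2 * (((rest.takeWhile (· == c)).length + 1) / 2) := by omega
      conv_lhs => rw [pvRun_replicate c rest, hk, pvEvens_replicate]
      rw [pvHalves, ih h]
    · simp [hpar] at h

-- exactly one odd run: evens of (sorted minus one middle occurrence) is the per-run halves
theorem pvEvens_of_one_odd (s : List Char) (hs : List.Pairwise (· ≤ ·) s) (m : Char)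
    (h : pvOdds s = [m]) : pvEvens (s.erase m) = pvHalves s := by
  induction s using pvPairs.induct with
  | case1 => simp [pvOdds] at h
  | case2 c rest ih =>
    have hpw : List.Pairwise (· ≤ ·) (rest.dropWhile (· == c)) :=
      ((List.pairwise_cons.mp hs).2).sublist (List.dropWhile_sublist _)
    rw [pvOdds] at h
    rcases Nat.mod_two_eq_zero_or_one ((rest.takeWhile (· == c)).length + 1) with hpar | hpar
    · -- even leading run: the odd char lives strictly later
      rw [hpar, if_neg (by omega : ¬ (0 = 1)), List.nil_append] at h
      have hmdw : m ∈ rest.dropWhile (· == c) :=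
        pvOdds_subset _ m (by rw [h]; simp)
      have hcm : c ≠ m := ne_of_lt (pvDropWhile_gt c rest hs m hmdw)
      have herase : (c :: rest : List Char).erase m =
          List.replicate ((rest.takeWhile (· == c)).length + 1) c
            ++ (rest.dropWhile (· == c)).erase m := by
        rw [pvRun_replicate c rest]
        rw [List.erase_append_right]
        intro hmem
        exact hcm (List.eq_of_mem_replicate hmem).symm
      have hk : (rest.takeWhile (· == c)).length + 1 =
          2 * (((rest.takeWhile (· == c)).length + 1) / 2) := by omega
      conv_lhs => rw [herase, hk, pvEvens_replicate]
      rw [ih hpw h, pvHalves]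
    · -- odd leading run: c = m, remove its first element
      rw [hpar, if_pos rfl, List.singleton_append] at h
      have hcm : c = m := (List.cons_eq_cons.mp h).1
      have hdw : pvOdds (rest.dropWhile (· == c)) = [] := (List.cons_eq_cons.mp h).2
      subst hcm
      rw [List.erase_cons_head]
      have hk : (rest.takeWhile (· == c)).length =
          2 * (((rest.takeWhile (· == c)).length + 1) / 2) := by omega
      have htw : rest.takeWhile (· == c) = List.replicate (rest.takeWhile (· == c)).length c := by
        apply List.eq_replicate_of_mem
        intro y hy
        simpa using List.mem_takeWhile_imp hy
      conv_lhs => rw [← List.takeWhile_append_dropWhile (p := (· == c)) (l := rest), htw, hk]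
      rw [pvEvens_replicate, pvEvens_of_no_odds _ hdw, pvHalves]

-- rest[::2] selects exactly pvEvens
theorem pvFilterMap_evens (xs : List Char) :
    List.filterMap (fun k => xs[2 * k]?) (List.range ((xs.length + 1) / 2)) = pvEvens xs := by
  induction xs using pvEvens.induct with
  | case1 => simp [pvEvens]
  | case2 a => simp [pvEvens, List.range_succ]
  | case3 a b t ih =>
    have hlen : ((a :: b :: t : List Char).length + 1) / 2 = (t.length + 1) / 2 + 1 := by
      simp only [List.length_cons]
      omega
    rw [hlen, List.range_succ_eq_map, List.filterMap_cons]
    simp only [Nat.mul_zero, List.getElem?_cons_zero, List.filterMap_map]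
    rw [pvEvens, ← ih]
    congr 1

theorem pvSlice2 (xs : List Char) :
    PySem.List.slice? xs none none 2 = some (pvEvens xs) := by
  rw [PySem.List.slice?]
  rw [if_neg (by omega : ¬ (2 : Int) = 0)]
  have hidx : PySem.List.sliceIndices xs.length none none 2 = (0, (xs.length : Int), 2) := by
    simp [PySem.List.sliceIndices]
  rw [hidx]
  rcases Nat.eq_zero_or_pos xs.length with h0 | h0
  · have hnil : xs = [] := List.eq_nil_of_length_eq_zero h0
    subst hnil
    simp [pvEvens]
  · have hcount : ((((xs.length : Int)) - 0 + 2 - 1) / 2).toNat = (xs.length + 1) / 2 := by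
      have h : ((xs.length : Int) - 0 + 2 - 1) = ((xs.length + 1 : Nat) : Int) := by
        push_cast; ring
      rw [h]
      norm_cast
    simp only [if_pos (by omega : (0:Int) < 2), if_pos (by exact_mod_cast h0 : (0:Int) < (xs.length : Int)), hcount]
    rw [← pvFilterMap_evens xs]
    congr 1
    apply List.filterMap_congr
    intro k _
    have h2 : ((0:Int) + 2 * (k : Int)).toNat = 2 * k := by omega
    rw [h2]

-- ===== VERDICT (by name: the statement is the Claim_ definition above) =====
theorem findEncryptedPassword_spec : Claim_equal_findEncryptedPassword := by
  intro password _
  unfold Spec_findEncryptedPassword findEncryptedPassword findEncryptedPassword_alt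
  have hcnt : ∀ c : Char,
      (PySem.Str.count password (String.mk [c]) : Int) = (password.toList.count c : Int) := by
    intro c
    rw [PySem.Str.count_eq]
    norm_cast
    rw [show (String.mk [c]).toList = [c] from Eq.symm (String.ofList_eq.mp rfl)]
    exact pvCount_singleton _ _
  simp only [hcnt]
  rw [pvCharCounts_eq password.toList]
  have hsperm : (PySem.List.sorted password.toList (fun c => c)).Perm password.toList :=
    PySem.List.sorted_perm password.toList (fun c => c) false
  have hspw : List.Pairwise (· ≤ ·) (PySem.List.sorted password.toList (fun c => c)) :=
    PySem.List.sorted_pairwise password.toList (fun c => c)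
  set s := PySem.List.sorted password.toList (fun c => c) with hsdef
  rw [pvALoop_char s [] []]
  simp only [List.isEmpty_nil, if_true, List.nil_append]
  set u := password.toList.foldl pvToggle PySem.Set.empty with hudef
  have humem : ∀ x, x ∈ u ↔ s.count x % 2 = 1 := by
    intro x
    rw [hudef, pvToggleFold_mem]
    simp only [PySem.Set.empty, List.not_mem_nil, false_iff]
    rw [hsperm.count_eq x]
    omega
  have hund : u.Nodup := pvToggleFold_nodup _ _ (by simp [PySem.Set.empty])
  have hond : (pvOdds s).Nodup := (pvOdds_pairwise s hspw).nodup
  have hperm : u.Perm (pvOdds s) := by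
    rw [List.perm_ext_iff_of_nodup hund hond]
    intro x
    rw [humem x, pvOdds_mem_iff s hspw x]
  rcases hods : pvOdds s with _ | ⟨m, _ | ⟨m2, tl⟩⟩
  · -- no odd-count character
    have hu : u = [] := by
      have h := hperm
      rw [hods] at h
      exact h.eq_nil
    rw [hu]
    simp only [PySem.Set.len, List.length_nil, PySem.List.min?, List.foldl_nil, Nat.cast_zero]
    rw [if_neg (by omega : ¬ (1:Int) < 0)]
    rw [pvSlice2 s, Option.getD_some, pvEvens_of_no_odds s hods]
    rfl
  · -- exactly one odd-count character m
    have hu : u = [m] := by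
      have h := hperm
      rw [hods] at h
      exact List.perm_singleton.mp h
    have hms : m ∈ s := pvOdds_subset s m (by rw [hods]; exact List.mem_singleton_self m)
    rw [hu]
    simp only [PySem.Set.len, List.length_singleton, PySem.List.min?, List.foldl_cons,
      List.foldl_nil, Nat.cast_one]
    rw [if_neg (by omega : ¬ (1:Int) < 1)]
    rw [PySem.List.remove?_eq_some_erase s m hms, Option.getD_some]
    rw [pvSlice2 (s.erase m), Option.getD_some, pvEvens_of_one_odd s hspw m hods]
    rfl
  · -- at least two odd-count characters
    have hlen : 2 ≤ u.length := by
      rw [hperm.length_eq, hods]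
      simp only [List.length_cons]
      omega
    have hgt : (1:Int) < PySem.Set.len u := by
      rw [PySem.Set.len]
      have h2 : (2:Int) ≤ (u.length : Int) := by exact_mod_cast hlen
      omega
    rw [if_pos hgt]
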